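-- pv_equiv track=rewrite | github.com/chakraa1/Data-Structures-and-Algorithms | Hashing/SubarrayWithDistinctCount.py | SubarrayDistinctOptimized
-- ===== SOURCE A (Python) =====
-- from collections import Counter
--
-- def SubarrayDistinctOptimized(A,K):
--     ans = []
--     n = len(A)
--     counts = Counter()
--     # Process the first window of size k
--     for i in range(K):
--         counts[A[i]] += 1
--     ans.append(len(counts))
--
--     # process the remaining windows
--     for i in range(K,n):
--         # increment the frequency of the last element of the new window
--         counts[A[i]] += 1
--         # decrement the frequency of the first element of the previous window
--         to_remove = A[i-K]
--         counts[to_remove] -= 1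
--
--         # if frequency drops to 0, remove the element
--         if counts[to_remove] == 0:
--             del counts[to_remove]
--
--         ans.append(len(counts))
--
--     return ans
-- ===== SOURCE B (Python) =====
-- def SubarrayDistinctOptimized(A, K):
--     if K < 0 or K > len(A):
--         raise IndexError("window size out of range")
--     return [len(set(A[i:i+K])) for i in range(len(A) - K + 1)]
-- ===== Notes on version B (the rewrite author's own statement) =====
-- stated objective: simpler
-- what changed: Replaced the incremental Counter-based sliding window (increment new element, decrement and delete the outgoing one, record dict size) by a validated one-line comprehension that independently recomputes each window's distinct count as len(set(A[i:i+K])).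
import Mathlib
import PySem

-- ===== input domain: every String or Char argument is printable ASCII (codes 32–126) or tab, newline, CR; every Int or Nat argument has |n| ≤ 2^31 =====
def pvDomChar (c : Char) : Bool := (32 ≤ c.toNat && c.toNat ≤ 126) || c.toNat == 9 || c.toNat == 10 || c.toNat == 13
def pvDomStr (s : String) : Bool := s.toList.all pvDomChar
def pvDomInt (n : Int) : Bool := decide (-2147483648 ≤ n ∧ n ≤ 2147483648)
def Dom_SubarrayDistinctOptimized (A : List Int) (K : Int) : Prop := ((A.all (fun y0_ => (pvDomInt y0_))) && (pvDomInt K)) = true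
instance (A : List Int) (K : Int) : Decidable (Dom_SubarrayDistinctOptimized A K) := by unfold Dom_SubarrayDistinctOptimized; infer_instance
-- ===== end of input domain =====

-- B replaces A's incremental Counter-based sliding window by a validated direct
-- per-window recomputation len(set(A[i:i+K])); objective: simpler (not faster).
-- Return-value equivalence is claimed only on Pre_ (0 ≤ K ≤ len(A)); on other
-- inputs both programs raise.

-- ===== PORT A =====
-- Counter() is an Int-valued Dict; counts[x] += 1 is Dict.modify x 0 (·+1).
-- A[i] is ported with pyGetD (none/IndexError cases are exactly the inputs Pre_ excludes).
def SubarrayDistinctOptimized (A : List Int) (K : Int) : List Int :=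
  let ans : List Int := []
  let n : Int := (A.length : Int)
  let counts : PySem.Dict Int Int := PySem.Dict.empty
  -- for i in range(K): counts[A[i]] += 1
  let counts := (PySem.List.pyRange 0 K 1).foldl
    (fun c i => c.modify (PySem.List.pyGetD A i 0) 0 (· + 1)) counts
  let ans := ans ++ [(counts.size : Int)]
  -- for i in range(K, n): …
  let st := (PySem.List.pyRange K n 1).foldl
    (fun (st : PySem.Dict Int Int × List Int) i =>
      let c := st.1.modify (PySem.List.pyGetD A i 0) 0 (· + 1)
      let to_remove := PySem.List.pyGetD A (i - K) 0
      let c := c.modify to_remove 0 (· - 1)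
      -- del counts[to_remove] (the key is always present here, so erase = del)
      let c := if c.getD to_remove 0 == 0 then c.erase to_remove else c
      (c, st.2 ++ [(c.size : Int)]))
    (counts, ans)
  st.2

-- ===== PORT B =====
-- if K < 0 or K > len(A): raise IndexError  (raise → the branch is outside Pre_;
-- the port returns [] there, nothing is claimed about it)
-- return [len(set(A[i:i+K])) for i in range(len(A)-K+1)]
def SubarrayDistinctOptimized_alt (A : List Int) (K : Int) : List Int :=
  if K < 0 ∨ (A.length : Int) < K then []
  else
    (PySem.List.pyRange 0 ((A.length : Int) - K + 1) 1).map
      (fun i => ((PySem.Set.ofList (PySem.List.slice A (some i) (some (i + K)))).length : Int))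

-- ===== PRECONDITION & SPEC =====
-- Pre_ is exactly the set of inputs on which A returns: for K < 0 or K > len(A)
-- the window indexing A[i] / A[i-K] runs off the list and A raises IndexError
-- (B raises there too).
def Pre_SubarrayDistinctOptimized (A : List Int) (K : Int) : Prop :=
  0 ≤ K ∧ K ≤ (A.length : Int)
instance (A : List Int) (K : Int) : Decidable (Pre_SubarrayDistinctOptimized A K) := by
  unfold Pre_SubarrayDistinctOptimized; infer_instance

def pvWitness_SubarrayDistinctOptimized : List Int × Int := ([1, 2, 1, 3], 2)

def Spec_SubarrayDistinctOptimized (A : List Int) (K : Int) (out : List Int) : Prop := out = SubarrayDistinctOptimized_alt A K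
instance (A : List Int) (K : Int) (out : List Int) : Decidable (Spec_SubarrayDistinctOptimized A K out) := by unfold Spec_SubarrayDistinctOptimized; infer_instance

-- ===== CLAIM (what is proved, stated in full; the proofs are below) =====
def Claim_equal_SubarrayDistinctOptimized : Prop := ∀ (A : List Int) (K : Int), Dom_SubarrayDistinctOptimized A K → Pre_SubarrayDistinctOptimized A K → Spec_SubarrayDistinctOptimized A K (SubarrayDistinctOptimized A K)

-- ===== LEMMAS AND PROOFS =====

-- the window of length k starting at position p
def pvWin (A : List Int) (k p : Nat) : List Int := (A.drop p).take k

-- loop invariant: the dict's keys are distinct, its values are the multiplicities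
-- in the current window, and every key actually occurs in the window
def pvInv (d : PySem.Dict Int Int) (w : List Int) : Prop :=
  d.keys.Nodup ∧ (∀ x : Int, d.getD x 0 = (w.count x : Int)) ∧ (∀ x ∈ d.keys, x ∈ w)

lemma pvkeys_erase (d : PySem.Dict Int Int) (k : Int) :
    (d.erase k).keys = d.keys.filter (fun y => !(y == k)) := by
  obtain ⟨items⟩ := d
  simp only [PySem.Dict.erase, PySem.Dict.keys]
  induction items with
  | nil => rfl
  | cons p t ih => by_cases h : (p.1 == k) = true <;> simp [List.filter_cons, h, ih]

lemma pvmem_keys_erase (d : PySem.Dict Int Int) (k y : Int) :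
    y ∈ (d.erase k).keys ↔ y ∈ d.keys ∧ y ≠ k := by
  simp [pvkeys_erase]

lemma pvnodup_keys_erase (d : PySem.Dict Int Int) (k : Int) (h : d.keys.Nodup) :
    (d.erase k).keys.Nodup := by
  rw [pvkeys_erase]; exact h.filter _

lemma pvget?_erase_self (d : PySem.Dict Int Int) (k : Int) :
    (d.erase k).get? k = none := by
  obtain ⟨items⟩ := d
  simp only [PySem.Dict.erase, PySem.Dict.get?]
  induction items with
  | nil => rfl
  | cons p t ih =>
    by_cases h : (p.1 == k) = true
    · simpa [List.filter_cons, h] using ih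
    · simp [List.filter_cons, h, List.find?_cons, ih]

lemma pvget?_erase_ne (d : PySem.Dict Int Int) (k y : Int) (hne : y ≠ k) :
    (d.erase k).get? y = d.get? y := by
  obtain ⟨items⟩ := d
  simp only [PySem.Dict.erase, PySem.Dict.get?]
  induction items with
  | nil => rfl
  | cons p t ih =>
    by_cases h : (p.1 == k) = true
    · have hy : (p.1 == y) = false := by
        have hpk : p.1 = k := by simpa using h
        simp [hpk]
        omega
      simp only [List.filter_cons, h]
      simpa [List.find?_cons, hy] using ih
    · by_cases hy : (p.1 == y) = true
      · simp [List.filter_cons, h, List.find?_cons, hy]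
      · simp only [List.filter_cons, h]
        simpa [List.find?_cons, hy] using ih

lemma pvgetD_erase (d : PySem.Dict Int Int) (k y : Int) :
    (d.erase k).getD y 0 = if y = k then 0 else d.getD y 0 := by
  by_cases h : y = k
  · subst h; simp [PySem.Dict.getD, pvget?_erase_self]
  · simp [PySem.Dict.getD, pvget?_erase_ne d k y h, h]

lemma pvsize_eq_keys_length (d : PySem.Dict Int Int) : d.size = d.keys.length := by
  simp [PySem.Dict.size, PySem.Dict.keys]

-- a dict satisfying the invariant has exactly as many entries as the window has
-- distinct values
lemma pvinv_size (d : PySem.Dict Int Int) (w : List Int) (h : pvInv d w) :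
    d.size = (PySem.Set.ofList w).length := by
  obtain ⟨hnd, hval, hmem⟩ := h
  rw [pvsize_eq_keys_length]
  refine List.Perm.length_eq ?_
  rw [List.perm_ext_iff_of_nodup hnd (PySem.Set.nodup_ofList w)]
  intro x
  rw [PySem.Set.mem_ofList]
  constructor
  · exact fun hx => hmem x hx
  · intro hx
    have hc : 0 < w.count x := List.count_pos_iff.2 hx
    by_contra hk
    have : d.contains x = false := by
      rcases hcc : d.contains x with _ | _
      · rfl
      · exact absurd ((PySem.Dict.contains_iff_mem_keys d x).1 hcc) hk
    have h0 := PySem.Dict.getD_of_not_contains d (0 : Int) this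
    rw [hval x] at h0
    omega

lemma pvinv_counter (w : List Int) : pvInv (PySem.Dict.counter w) w := by
  refine ⟨PySem.Dict.nodup_keys_counter w, fun x => PySem.Dict.getD_counter w x, fun x hx => ?_⟩
  rw [PySem.Dict.keys_counter] at hx
  exact (PySem.Set.mem_ofList w x).1 hx

-- one iteration of A's loop body preserves the invariant, for the new window,
-- as soon as the counts shift by +1 at the incoming and -1 at the outgoing value
lemma pvstep (d : PySem.Dict Int Int) (w w' : List Int) (x a : Int)
    (hinv : pvInv d w)
    (hcnt : ∀ y : Int, (w'.count y : Int)
      = (w.count y : Int) + (if y = x then 1 else 0) - (if y = a then 1 else 0)) :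
    pvInv (if ((d.modify x 0 (· + 1)).modify a 0 (· - 1)).getD a 0 == 0
           then ((d.modify x 0 (· + 1)).modify a 0 (· - 1)).erase a
           else (d.modify x 0 (· + 1)).modify a 0 (· - 1)) w' := by
  obtain ⟨hnd, hval, hmem⟩ := hinv
  set d2 := (d.modify x 0 (· + 1)).modify a 0 (· - 1) with hd2
  have hval2 : ∀ y : Int, d2.getD y 0 = (w'.count y : Int) := by
    intro y
    rw [hd2, PySem.Dict.getD_modify, PySem.Dict.getD_modify, PySem.Dict.getD_modify,
      hcnt y]
    by_cases h1 : y = a <;> by_cases h2 : y = x <;>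
      simp [h1, h2, hval] <;> subst_vars <;> simp_all [hval] <;> omega
  have hkeys2 : ∀ y : Int, y ∈ d2.keys → y = a ∨ y = x ∨ y ∈ d.keys := by
    intro y hy
    rw [hd2, PySem.Dict.keys_modify, PySem.Dict.mem_keys_insert] at hy
    rcases hy with h | hy
    · exact Or.inl h
    · rw [PySem.Dict.keys_modify, PySem.Dict.mem_keys_insert] at hy
      rcases hy with h | h
      · exact Or.inr (Or.inl h)
      · exact Or.inr (Or.inr h)
  have hnd2 : d2.keys.Nodup := by
    rw [hd2, PySem.Dict.keys_modify]
    apply PySem.Dict.nodup_keys_insert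
    rw [PySem.Dict.keys_modify]
    exact PySem.Dict.nodup_keys_insert _ _ _ hnd
  have hmemw' : ∀ y : Int, y ∈ d2.keys → y ≠ a → y ∈ w' := by
    intro y hy hya
    have hcy := hcnt y
    rw [if_neg hya] at hcy
    by_cases hyx : y = x
    · subst hyx
      have : 0 < w'.count y := by rw [if_pos rfl] at hcy; omega
      exact List.count_pos_iff.1 this
    · rw [if_neg hyx] at hcy
      rcases hkeys2 y hy with h | h | h
      · exact absurd h hya
      · exact absurd h hyx
      · have : 0 < w.count y := List.count_pos_iff.2 (hmem y h)
        have : 0 < w'.count y := by omega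
        exact List.count_pos_iff.1 this
  by_cases hz : (d2.getD a 0 == 0) = true
  · rw [if_pos hz]
    have ha0 : (w'.count a : Int) = 0 := by
      rw [← hval2 a]; simpa [beq_iff_eq] using hz
    refine ⟨pvnodup_keys_erase d2 a hnd2, fun y => ?_, fun y hy => ?_⟩
    · rw [pvgetD_erase]
      by_cases h : y = a
      · subst h; omega
      · rw [if_neg h]; exact hval2 y
    · rw [pvmem_keys_erase] at hy
      exact hmemw' y hy.1 hy.2
  · rw [if_neg hz]
    refine ⟨hnd2, hval2, fun y hy => ?_⟩
    by_cases h : y = a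
    · subst h
      have : d2.getD y 0 ≠ 0 := by simpa [beq_iff_eq] using hz
      rw [hval2 y] at this
      have : 0 < w'.count y := by omega
      exact List.count_pos_iff.1 this
    · exact hmemw' y hy h

-- the first loop (over range(K)) builds exactly Counter(A[:K])
lemma pvfirst (A : List Int) : ∀ (k : Nat), k ≤ A.length → ∀ d : PySem.Dict Int Int,
    (PySem.List.pyRange 0 (k : Int) 1).foldl
      (fun c i => c.modify (PySem.List.pyGetD A i 0) 0 (· + 1)) d
    = (A.take k).foldl (fun c x => c.modify x 0 (· + 1)) d := by
  intro k
  induction k with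
  | zero => intro _ d; simp [PySem.List.pyRange_one_eq_nil]
  | succ m ih =>
    intro hm d
    have h1 : ((m : Nat) + 1 : Int) = (m : Int) + 1 := by push_cast; ring
    have hmlt : m < A.length := by omega
    rw [show ((m + 1 : Nat) : Int) = (m : Int) + 1 by push_cast; ring,
      PySem.List.pyRange_one_succ_right (by positivity),
      List.foldl_append, ih (by omega) d,
      List.take_succ_eq_append_getElem hmlt, List.foldl_append]
    simp [PySem.List.pyGetD_natCast, List.getElem?_eq_getElem hmlt]

-- the second loop: if the dict satisfies the invariant for the window ending
-- before index i, the tail of iterations appends the distinct counts of the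
-- remaining windows
lemma pvloop (A : List Int) (k : Nat) :
    ∀ (c : Nat) (i : Nat), i + c = A.length → k ≤ i →
    ∀ (d : PySem.Dict Int Int) (acc : List Int), pvInv d (pvWin A k (i - k)) →
    ((PySem.List.pyRange (i : Int) ((A.length : Int)) 1).foldl
       (fun (st : PySem.Dict Int Int × List Int) j =>
         let c1 := st.1.modify (PySem.List.pyGetD A j 0) 0 (· + 1)
         let tr := PySem.List.pyGetD A (j - (k : Int)) 0
         let c2 := c1.modify tr 0 (· - 1)
         let c3 := if c2.getD tr 0 == 0 then c2.erase tr else c2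
         (c3, st.2 ++ [(c3.size : Int)]))
       (d, acc)).2
    = acc ++ (List.range c).map
        (fun j => ((PySem.Set.ofList (pvWin A k (i - k + 1 + j))).length : Int)) := by
  intro c
  induction c with
  | zero =>
    intro i hi _ d acc _
    rw [PySem.List.pyRange_one_eq_nil (by omega)]
    simp
  | succ m ih =>
    intro i hi hki d acc hinv
    have hilt : i < A.length := by omega
    rw [PySem.List.pyRange_one_cons (by exact_mod_cast hilt)]
    rw [List.foldl_cons]
    have hx : PySem.List.pyGetD A (i : Int) 0 = A[i] := by
      rw [PySem.List.pyGetD_natCast, List.getD_eq_getElem _ _ hilt]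
    have hik : (i : Int) - (k : Int) = ((i - k : Nat) : Int) := by push_cast; omega
    have ha : PySem.List.pyGetD A ((i : Int) - (k : Int)) 0 = A.getD (i - k) 0 := by
      rw [hik, PySem.List.pyGetD_natCast]
    -- the count-shift fact for the two windows
    have hcnt : ∀ y : Int, ((pvWin A k (i - k + 1)).count y : Int)
        = ((pvWin A k (i - k)).count y : Int)
          + (if y = A[i] then 1 else 0) - (if y = A.getD (i - k) 0 then 1 else 0) := by
      intro y
      cases k with
      | zero =>
        have hgd : A.getD (i - 0) 0 = A[i] := List.getD_eq_getElem _ _ hilt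
        simp only [pvWin, List.take_zero, List.count_nil, hgd]
        by_cases h : y = A[i] <;> simp [h]
      | succ s =>
        have hks : s + 1 ≤ i := hki
        have hpk : i - (s + 1) < A.length := by omega
        have hdrop : A.drop (i - (s + 1))
            = A[i - (s + 1)] :: A.drop (i - (s + 1) + 1) := by
          rw [List.getElem_cons_drop]
        have hgd : A.getD (i - (s + 1)) 0 = A[i - (s + 1)] :=
          List.getD_eq_getElem _ _ hpk
        have hslen : s < (A.drop (i - (s + 1) + 1)).length := by
          rw [List.length_drop]; omega
        have hlast : (A.drop (i - (s + 1) + 1))[s] = A[i] := by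
          rw [List.getElem_drop]
          congr 1
          omega
        have hw : pvWin A (s + 1) (i - (s + 1))
            = A[i - (s + 1)] :: (A.drop (i - (s + 1) + 1)).take s := by
          rw [pvWin, hdrop, List.take_succ_cons]
        have hw' : pvWin A (s + 1) (i - (s + 1) + 1)
            = (A.drop (i - (s + 1) + 1)).take s ++ [A[i]] := by
          rw [pvWin, List.take_succ_eq_append_getElem hslen, hlast]
        rw [hw, hw']
        simp only [List.count_append, List.count_cons, List.count_nil, beq_iff_eq, hgd]
        by_cases h1 : y = A[i - (s + 1)] <;> by_cases h2 : y = A[i] <;>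
          simp [h1, h2] <;> push_cast <;> omega
    have hstep := pvstep d (pvWin A k (i - k)) (pvWin A k (i - k + 1))
      A[i] (A.getD (i - k) 0) hinv hcnt
    rw [hx, ha]
    set d' := if ((d.modify A[i] 0 (· + 1)).modify (A.getD (i - k) 0) 0 (· - 1)).getD
        (A.getD (i - k) 0) 0 == 0
      then ((d.modify A[i] 0 (· + 1)).modify (A.getD (i - k) 0) 0 (· - 1)).erase
        (A.getD (i - k) 0)
      else (d.modify A[i] 0 (· + 1)).modify (A.getD (i - k) 0) 0 (· - 1) with hd'
    have hinv' : pvInv d' (pvWin A k ((i + 1) - k)) := by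
      rw [show (i + 1) - k = i - k + 1 by omega]
      exact hstep
    have hszn : d'.size = (PySem.Set.ofList (pvWin A k (i - k + 1))).length :=
      pvinv_size d' _ hstep
    rw [show ((i : Int) + 1) = ((i + 1 : Nat) : Int) by push_cast; ring]
    have htrans := ih (i + 1) (by omega) (by omega) d' (acc ++ [(d'.size : Int)]) hinv'
    have hrest : (acc ++ [(d'.size : Int)]) ++ (List.range m).map
          (fun j => ((PySem.Set.ofList (pvWin A k ((i + 1) - k + 1 + j))).length : Int))
        = acc ++ (List.range (m + 1)).map
          (fun j => ((PySem.Set.ofList (pvWin A k (i - k + 1 + j))).length : Int)) := by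
      rw [hszn, List.range_succ_eq_map, List.map_cons, List.map_map, List.append_assoc,
        List.singleton_append]
      have htail : (List.range m).map
            (fun j => ((PySem.Set.ofList (pvWin A k ((i + 1) - k + 1 + j))).length : Int))
          = (List.range m).map
            ((fun j => ((PySem.Set.ofList (pvWin A k (i - k + 1 + j))).length : Int))
              ∘ Nat.succ) := by
        apply List.map_congr_left
        intro j _
        simp only [Function.comp_apply]
        have he : (i + 1) - k + 1 + j = i - k + 1 + (j + 1) := by omega
        rw [he]
      rw [htail]
    exact htrans.trans hrest

-- ===== VERDICT (by name: the statement is the Claim_ definition above) =====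
theorem SubarrayDistinctOptimized_spec : Claim_equal_SubarrayDistinctOptimized := by
  intro A K _ hpre
  obtain ⟨h0, h1⟩ := hpre
  obtain ⟨k, rfl⟩ : ∃ k : Nat, K = (k : Int) := ⟨K.toNat, (Int.toNat_of_nonneg h0).symm⟩
  have hk : k ≤ A.length := by exact_mod_cast h1
  unfold Spec_SubarrayDistinctOptimized SubarrayDistinctOptimized
  simp only []
  rw [pvfirst A k hk PySem.Dict.empty]
  rw [show (A.take k).foldl (fun c x => c.modify x 0 (· + 1)) PySem.Dict.empty
      = PySem.Dict.counter (A.take k) from rfl]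
  have hinv0 : pvInv (PySem.Dict.counter (A.take k)) (pvWin A k 0) := by
    rw [pvWin, List.drop_zero]; exact pvinv_counter _
  rw [pvloop A k (A.length - k) k (by omega) le_rfl _ _ (by simpa using hinv0)]
  have hsz0 : (PySem.Dict.counter (A.take k)).size
      = (PySem.Set.ofList (pvWin A k 0)).length := pvinv_size _ _ hinv0
  rw [hsz0]
  -- B's side: the validation guard is false inside Pre_, then the comprehension
  -- is the same map over window starts
  have hb : (A.length : Int) - (k : Int) + 1 = ((A.length - k + 1 : Nat) : Int) := by
    push_cast; omega
  have hB : SubarrayDistinctOptimized_alt A (k : Int)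
      = (List.range (A.length - k + 1)).map
          (fun j => ((PySem.Set.ofList (pvWin A k j)).length : Int)) := by
    unfold SubarrayDistinctOptimized_alt
    rw [if_neg (by push_cast; omega)]
    rw [hb, PySem.List.pyRange_one, List.map_map]
    rw [show (((A.length - k + 1 : Nat) : Int) - 0).toNat = A.length - k + 1 by omega]
    apply List.map_congr_left
    intro j _
    simp only [Function.comp_apply, zero_add]
    rw [PySem.List.slice_natCast_add A j k]
    rfl
  rw [hB, List.range_succ_eq_map, List.map_cons, List.map_map]
  simp only [List.nil_append, List.singleton_append]
  have htail : (List.range (A.length - k)).map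
        (fun j => ((PySem.Set.ofList (pvWin A k (k - k + 1 + j))).length : Int))
      = (List.range (A.length - k)).map
        ((fun j => ((PySem.Set.ofList (pvWin A k j)).length : Int)) ∘ Nat.succ) := by
    apply List.map_congr_left
    intro j _
    simp only [Function.comp_apply]
    have he : k - k + 1 + j = j + 1 := by omega
    rw [he]
  rw [htail]
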